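-- pv_equiv track=rewrite | github.com/mercedesprima/PythonHT | НТ5_3_6.py | letter_groups
-- ===== SOURCE A (Python) =====
-- def letter_groups(input_words):
--     dic = {}
--     for i in input_words:
--         key = "".join(sorted(i))
--         if key not in dic:
--             dic[key] = []
--
--         dic[key].append(i)
--
--     return list(dic.values())
-- ===== SOURCE B (Python) =====
-- def letter_groups(input_words):
--     groups = []
--     for word in input_words:
--         k = sorted(word)
--         for g in groups:
--             if sorted(g[0]) == k:
--                 g.append(word)
--                 break
--         else:
--             groups.append([word])
--     return groups
-- ===== Notes on version B (the rewrite author's own statement) =====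
-- stated objective: alternative
-- what changed: Replaced the dict keyed by the sorted-letter string with a plain list of groups that is linearly scanned for the first group whose representative (first) word is an anagram of the incoming word; this trades the hash index for a scan that is quadratic in the number of groups.
import Mathlib
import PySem

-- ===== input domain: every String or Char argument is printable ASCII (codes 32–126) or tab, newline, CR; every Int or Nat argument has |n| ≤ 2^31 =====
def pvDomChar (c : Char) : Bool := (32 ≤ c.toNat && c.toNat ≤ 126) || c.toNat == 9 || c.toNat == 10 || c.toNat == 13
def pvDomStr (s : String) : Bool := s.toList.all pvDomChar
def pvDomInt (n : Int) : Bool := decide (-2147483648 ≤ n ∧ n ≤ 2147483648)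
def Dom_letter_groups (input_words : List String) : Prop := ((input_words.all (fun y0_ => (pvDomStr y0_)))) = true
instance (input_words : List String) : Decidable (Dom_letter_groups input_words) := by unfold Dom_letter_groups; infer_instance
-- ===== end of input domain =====

-- B replaces A's dict keyed by sorted letters with a linear scan over a list of groups; same return value, no speed claim.

-- key = "".join(sorted(i)), kept as the sorted char list (the join only packages it as a
-- str; the key is used solely for dict lookup and List Char equality = String equality)
def pvSKey (s : String) : List Char := PySem.List.sorted s.toList (fun c => c) false

-- ===== PORT A =====
def letter_groups (input_words : List String) : List (List String) :=
  (input_words.foldl (fun dic i =>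
      let key := pvSKey i
      -- if key not in dic: dic[key] = []
      let dic := if dic.contains key then dic else dic.insert key ([] : List String)
      -- dic[key].append(i)  (read-modify-write of the entry)
      dic.insert key (dic.getD key [] ++ [i]))
    PySem.Dict.empty).values

-- ===== PORT B =====
-- scan the groups for the first one whose first element is an anagram of word
def lgScan (groups : List (List String)) (k : List Char) (word : String) : List (List String) :=
  match groups with
  | [] => [[word]]
  | g :: rest =>
    match g with
    | [] => g :: lgScan rest k word  -- unreachable: every group built below is nonempty
    | x :: _ =>
      if pvSKey x = k then (g ++ [word]) :: rest else g :: lgScan rest k word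

def letter_groups_alt (input_words : List String) : List (List String) :=
  input_words.foldl (fun groups word => lgScan groups (pvSKey word) word) []

-- ===== PRECONDITION & SPEC =====
def Spec_letter_groups (input_words : List String) (out : List (List String)) : Prop := out = letter_groups_alt input_words
instance (input_words : List String) (out : List (List String)) : Decidable (Spec_letter_groups input_words out) := by unfold Spec_letter_groups; infer_instance

-- ===== CLAIM (what is proved, stated in full; the proofs are below) =====
def Claim_equal_letter_groups : Prop := ∀ (input_words : List String), Dom_letter_groups input_words → Spec_letter_groups input_words (letter_groups input_words)

-- ===== LEMMAS AND PROOFS =====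

-- the key of a group = sorted letters of its first word
def pvHKey (g : List String) : List Char := pvSKey (g.headD "")

-- loop invariant tying A's dict to B's group list
def pvInv (d : PySem.Dict (List Char) (List String)) (gs : List (List String)) : Prop :=
  d.items = gs.map (fun g => (pvHKey g, g)) ∧ (gs.map pvHKey).Nodup ∧ ∀ g ∈ gs, g ≠ []

theorem pvHKey_append (g : List String) (hg : g ≠ []) (w : String) :
    pvHKey (g ++ [w]) = pvHKey g := by
  cases g with
  | nil => exact absurd rfl hg
  | cons x t => simp [pvHKey]

theorem lgScan_no_match (gs : List (List String)) (k : List Char) (w : String)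
    (hk : ∀ g ∈ gs, pvHKey g ≠ k) : lgScan gs k w = gs ++ [[w]] := by
  induction gs with
  | nil => rfl
  | cons g rest ih =>
    cases g with
    | nil => simp [lgScan, ih (fun g hg => hk g (by simp [hg]))]
    | cons x t =>
      have hx : pvSKey x ≠ k := hk (x :: t) (by simp)
      simp [lgScan, hx, ih (fun g hg => hk g (by simp [hg]))]

theorem lgScan_match (pre post : List (List String)) (g : List String) (k : List Char)
    (w : String) (hpre : ∀ g' ∈ pre, pvHKey g' ≠ k) (hg : g ≠ []) (hk : pvHKey g = k) :
    lgScan (pre ++ g :: post) k w = pre ++ (g ++ [w]) :: post := by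
  induction pre with
  | nil =>
    cases g with
    | nil => exact absurd rfl hg
    | cons x t => simp [lgScan, ← hk, pvHKey]
  | cons p rest ih =>
    cases p with
    | nil => simp [lgScan, ih (fun g' hg' => hpre g' (by simp [hg']))]
    | cons x t =>
      have hx : pvSKey x ≠ k := hpre (x :: t) (by simp)
      simp [lgScan, hx, ih (fun g' hg' => hpre g' (by simp [hg']))]

theorem pv_step (d : PySem.Dict (List Char) (List String)) (gs : List (List String))
    (w : String) (h : pvInv d gs) :
    pvInv ((if d.contains (pvSKey w) then d else d.insert (pvSKey w) []).insert (pvSKey w)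
             ((if d.contains (pvSKey w) then d else d.insert (pvSKey w) []).getD (pvSKey w) [] ++ [w]))
          (lgScan gs (pvSKey w) w) := by
  obtain ⟨hitems, hnd, hne⟩ := h
  set k := pvSKey w with hkdef
  have hkeys : d.keys = gs.map pvHKey := by
    simp only [PySem.Dict.keys, hitems, List.map_map]; rfl
  by_cases hc : d.contains k = true
  · -- key already present
    have hkmem : k ∈ gs.map pvHKey := by
      have := (PySem.Dict.contains_iff_mem_keys (d := d) (k := k)).mp hc
      rwa [hkeys] at this
    obtain ⟨g, hgmem, hgk⟩ := List.mem_map.mp hkmem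
    obtain ⟨pre, post, rfl⟩ := List.append_of_mem hgmem
    have hndk : (pre.map pvHKey ++ pvHKey g :: post.map pvHKey).Nodup := by
      have := hnd; rwa [List.map_append, List.map_cons] at this
    have hpre : ∀ g' ∈ pre, pvHKey g' ≠ k := by
      intro g' hg' heq
      exact (List.nodup_append.mp hndk).2.2 (pvHKey g') (List.mem_map_of_mem hg')
        (pvHKey g) List.mem_cons_self (by rw [heq, hgk])
    have hpost : ∀ g' ∈ post, pvHKey g' ≠ k := by
      intro g' hg' heq
      have h2 := (List.nodup_append.mp hndk).2.1
      rw [List.nodup_cons] at h2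
      exact h2.1 (by rw [hgk, ← heq]; exact List.mem_map_of_mem hg')
    have hgneq : g ≠ [] := hne g hgmem
    have hknodup : d.keys.Nodup := by rw [hkeys]; exact hnd
    have hgetD : d.getD k [] = g := by
      refine PySem.Dict.getD_of_mem_items d ?_ hknodup []
      rw [hitems]
      exact List.mem_map.mpr ⟨g, hgmem, by rw [hgk]⟩
    rw [if_pos hc, lgScan_match pre post g k w hpre hgneq hgk, hgetD]
    refine ⟨?_, ?_, ?_⟩
    · rw [PySem.Dict.items_insert_of_contains d _ hc, hitems]
      simp only [List.map_append, List.map_cons, List.map_map]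
      congr 1
      · apply List.map_congr_left
        intro g' hg'
        simp [Function.comp, hpre g' hg']
      · congr 1
        · simp [Function.comp, hgk, pvHKey_append g hgneq w]
        · apply List.map_congr_left
          intro g' hg'
          simp [Function.comp, hpost g' hg']
    · rw [List.map_append, List.map_cons, pvHKey_append g hgneq w]
      exact hndk
    · intro g' hg'
      rcases List.mem_append.mp hg' with h1 | h1
      · exact hne g' (by simp [h1])
      · rcases List.mem_cons.mp h1 with h2 | h2
        · simp [h2]
        · exact hne g' (by simp [h2])
  · -- new key
    have hc' : d.contains k = false := by simpa using hc
    have hkmem : k ∉ gs.map pvHKey := by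
      intro hmem
      exact hc ((PySem.Dict.contains_iff_mem_keys (d := d) (k := k)).mpr (by rwa [hkeys]))
    have hno : ∀ g ∈ gs, pvHKey g ≠ k := fun g hg heq => hkmem (heq ▸ List.mem_map_of_mem hg)
    rw [if_neg (by simp [hc']), lgScan_no_match gs k w hno]
    rw [PySem.Dict.getD_insert_self, PySem.Dict.insert_insert_self]
    refine ⟨?_, ?_, ?_⟩
    · rw [PySem.Dict.items_insert_of_not_contains d _ hc', hitems]
      simp [pvHKey, hkdef]
    · rw [List.map_append]
      simp only [List.map_cons, List.map_nil]
      have hw : pvHKey [w] = k := by simp [pvHKey, hkdef]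
      rw [hw]
      exact List.Nodup.append hnd (List.nodup_singleton k) (by simpa using hkmem)
    · intro g' hg'
      rcases List.mem_append.mp hg' with h1 | h1
      · exact hne g' h1
      · simp at h1; simp [h1]

theorem pv_loop (ws : List String) (d : PySem.Dict (List Char) (List String))
    (gs : List (List String)) (h : pvInv d gs) :
    (ws.foldl (fun dic i =>
        let key := pvSKey i
        let dic := if dic.contains key then dic else dic.insert key ([] : List String)
        dic.insert key (dic.getD key [] ++ [i])) d).values
      = ws.foldl (fun groups word => lgScan groups (pvSKey word) word) gs := by
  induction ws generalizing d gs with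
  | nil =>
    simp only [List.foldl_nil]
    obtain ⟨hitems, -, -⟩ := h
    simp [PySem.Dict.values, hitems, List.map_map, Function.comp_def]
  | cons w ws ih =>
    simp only [List.foldl_cons]
    exact ih _ _ (pv_step d gs w h)

-- ===== VERDICT (by name: the statement is the Claim_ definition above) =====
theorem letter_groups_spec : Claim_equal_letter_groups := by
  intro ws _
  unfold Spec_letter_groups letter_groups letter_groups_alt
  exact pv_loop ws PySem.Dict.empty [] ⟨rfl, by simp, by simp⟩
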